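-- pv_equiv track=rewrite | github.com/obfuscat3d/AdventOfCode | 2018/d25/p1.py | add_point
-- ===== SOURCE A (Python) =====
-- def md(a, b):
--     return sum(map(abs, [i - j for i, j in zip(a, b)]))
--
-- def add_point(constellations, p):
--     joined, i = None, 0
--     while i < len(constellations):
--         c = constellations[i]
--         for m in c:
--             if md(p, m) <= 3 and not joined:
--                 c.append(p)
--                 joined = c
--                 break
--             elif md(p, m) <= 3:
--                 joined += c
--                 del constellations[i]
--                 i -= 1
--                 break
--         i += 1
--     if not joined:
--         constellations.append([p])
--     return constellations
-- ===== SOURCE B (Python) =====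
-- def md(a, b):
--     return sum(abs(x - y) for x, y in zip(a, b))
--
-- def add_point(constellations, p):
--     # gather-then-merge: collect indices of all clusters near p, build the merged
--     # cluster once, and rebuild the list in one comprehension (returns a new list).
--     def near(c):
--         return any(md(p, m) <= 3 for m in c)
--     matched = [(i, c) for i, c in enumerate(constellations) if near(c)]
--     if not matched:
--         return constellations + [[p]]
--     first = matched[0][0]
--     merged = matched[0][1] + [p]
--     for _, c in matched[1:]:
--         merged = merged + c
--     return [merged if i == first else c
--             for i, c in enumerate(constellations)
--             if i == first or not near(c)]
-- ===== Notes on version B (the rewrite author's own statement) =====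
-- stated objective: alternative
-- what changed: Replaces A's single in-place while-loop (which mutates, deletes and re-indexes the list as it scans, aliasing the joined cluster) with a gather-then-merge decomposition: first collect all near clusters with their indices, then build the merged cluster once, then rebuild the result list in one comprehension; B returns a fresh list instead of mutating its argument.
import Mathlib
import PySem

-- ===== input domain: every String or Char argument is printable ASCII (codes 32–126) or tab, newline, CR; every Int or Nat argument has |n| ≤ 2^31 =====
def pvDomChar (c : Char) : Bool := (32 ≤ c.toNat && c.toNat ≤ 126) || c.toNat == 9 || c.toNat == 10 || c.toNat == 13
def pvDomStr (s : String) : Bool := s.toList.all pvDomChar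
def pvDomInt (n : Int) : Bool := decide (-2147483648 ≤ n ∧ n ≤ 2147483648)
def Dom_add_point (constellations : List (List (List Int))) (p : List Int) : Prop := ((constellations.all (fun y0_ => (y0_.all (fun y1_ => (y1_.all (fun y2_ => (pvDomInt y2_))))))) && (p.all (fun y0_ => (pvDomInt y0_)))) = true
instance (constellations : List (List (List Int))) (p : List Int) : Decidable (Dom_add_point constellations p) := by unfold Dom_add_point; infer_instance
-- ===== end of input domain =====

-- B rebuilds the list by gather-then-merge instead of A's in-place index loop; proved equal on
-- return values only: A mutates its arguments in place, B returns a fresh list (objective: alternative).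

-- ===== PORT A =====
-- md(a,b) = sum(map(abs, [i - j for i, j in zip(a, b)]))
def mdA (a b : List Int) : Int := (((a.zip b).map (fun ij => ij.1 - ij.2)).map (fun x => |x|)).sum

-- the inner 'for m in c: if md(p,m) <= 3 …: break': the branch taken depends only on whether
-- some member is close (joined is constant during the scan), scanned here with List.any
def closeA (p : List Int) (c : List (List Int)) : Bool := c.any (fun m => decide (mdA p m ≤ 3))

-- the while loop; 'joined' aliases constellations[j], modelled as the index j (in-place
-- mutation 'joined += c' becomes set j; 'del constellations[i]' is eraseIdx i, then i-1+1 = i)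
def addALoop (p : List Int) (cs : List (List (List Int))) (i : Nat) (joined : Option Nat) :
    List (List (List Int)) × Option Nat :=
  if h : i < cs.length then
    let c := cs[i]
    if closeA p c then
      match joined with
      | none => addALoop p (cs.set i (c ++ [p])) (i+1) (some i)
      | some j => addALoop p ((cs.set j (cs.getD j [] ++ c)).eraseIdx i) i (some j)
    else addALoop p cs (i+1) joined
  else (cs, joined)
termination_by cs.length - i
decreasing_by
  · simp only [List.length_set]; omega
  · simp only [List.length_eraseIdx, List.length_set, if_pos h]; omega
  · omega

def add_point (constellations : List (List (List Int))) (p : List Int) : List (List (List Int)) :=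
  match addALoop p constellations 0 none with
  | (r, none) => r ++ [[p]]
  | (r, some _) => r

-- ===== PORT B =====
-- md(a,b) = sum(abs(x - y) for x, y in zip(a, b))
def mdB (a b : List Int) : Int := ((a.zip b).map (fun xy => |xy.1 - xy.2|)).sum

def nearB (p : List Int) (c : List (List Int)) : Bool := c.any (fun m => decide (mdB p m ≤ 3))

def add_point_alt (constellations : List (List (List Int))) (p : List Int) : List (List (List Int)) :=
  let matched := (PySem.List.enumerate constellations).filter (fun ic => nearB p ic.2)
  match matched with
  | [] => constellations ++ [[p]]
  | (first, c0) :: rest =>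
    let merged := rest.foldl (fun acc ic => acc ++ ic.2) (c0 ++ [p])
    ((PySem.List.enumerate constellations).filter (fun ic => ic.1 == first || !nearB p ic.2)).map
      (fun ic => if ic.1 == first then merged else ic.2)

-- ===== PRECONDITION & SPEC =====
def Spec_add_point (constellations : List (List (List Int))) (p : List Int) (out : List (List (List Int))) : Prop := out = add_point_alt constellations p
instance (constellations : List (List (List Int))) (p : List Int) (out : List (List (List Int))) : Decidable (Spec_add_point constellations p out) := by unfold Spec_add_point; infer_instance

-- ===== CLAIM (what is proved, stated in full; the proofs are below) =====
def Claim_equal_add_point : Prop := ∀ (constellations : List (List (List Int))) (p : List Int), Dom_add_point constellations p → Spec_add_point constellations p (add_point constellations p)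

-- ===== LEMMAS AND PROOFS =====

-- common functional characterisation of both programs
def mflat (p : List Int) (l : List (List (List Int))) : List (List Int) :=
  (l.filter (fun c => nearB p c)).flatten

def mkeep (p : List Int) (l : List (List (List Int))) : List (List (List Int)) :=
  l.filter (fun c => !nearB p c)

def Fspec (p : List Int) : List (List (List Int)) → List (List (List Int))
  | [] => [[p]]
  | c :: rest =>
    if nearB p c then (c ++ [p] ++ mflat p rest) :: mkeep p rest else c :: Fspec p rest

theorem mdA_eq_mdB (a b : List Int) : mdA a b = mdB a b := by
  simp [mdA, mdB, List.map_map, Function.comp_def]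

theorem closeA_eq_nearB (p : List Int) (c : List (List Int)) : closeA p c = nearB p c := by
  simp [closeA, nearB, mdA_eq_mdB]

-- helper to state the postlude of A
def finishA (p : List Int) (x : List (List (List Int)) × Option Nat) : List (List (List Int)) :=
  match x with
  | (r, none) => r ++ [[p]]
  | (r, some _) => r

theorem eraseIdx_append_cons {α : Type} (l₁ : List α) (c : α) (l₂ : List α) :
    (l₁ ++ c :: l₂).eraseIdx l₁.length = l₁ ++ l₂ := by
  induction l₁ with
  | nil => rfl
  | cons x xs ih => simp [ih]

theorem addALoop_some (p : List Int) :
    ∀ (suffix pre : List (List (List Int))) (j : Nat), j < pre.length →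
    addALoop p (pre ++ suffix) pre.length (some j) =
    ((pre.set j (pre.getD j [] ++ mflat p suffix)) ++ mkeep p suffix, some j) := by
  intro suffix
  induction suffix with
  | nil =>
    intro pre j hj
    rw [addALoop]
    simp [mflat, mkeep, List.getD_eq_getElem _ _ hj, hj]
  | cons c rest ih =>
    intro pre j hj
    rw [addALoop]
    have hlt : pre.length < (pre ++ c :: rest).length := by simp
    rw [dif_pos hlt]
    have hget : (pre ++ c :: rest)[pre.length]'hlt = c := by
      simp
    rw [hget]; simp only [closeA_eq_nearB]
    by_cases hnc : nearB p c
    · rw [if_pos hnc]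
      have hset : (pre ++ c :: rest).set j ((pre ++ c :: rest).getD j [] ++ c)
          = (pre.set j (pre.getD j [] ++ c)) ++ c :: rest := by
        rw [List.getD_append _ _ _ _ hj, List.set_append_left _ _ hj]
      rw [hset]
      have he := eraseIdx_append_cons (pre.set j (pre.getD j [] ++ c)) c rest
      rw [List.length_set] at he
      rw [he]
      have hlen : pre.length = (pre.set j (pre.getD j [] ++ c)).length := by simp
      rw [hlen, ih _ j (by simpa using hj)]
      have hgd : (pre.set j (pre.getD j [] ++ c)).getD j [] = pre.getD j [] ++ c := by
        simp [List.getD_eq_getElem, hj]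
      rw [hgd, List.set_set]
      simp [mflat, mkeep, hnc, List.append_assoc]
    · rw [if_neg hnc]
      have h1 : pre ++ c :: rest = (pre ++ [c]) ++ rest := by simp
      have h2 : pre.length + 1 = (pre ++ [c]).length := by simp
      rw [h1, h2, ih _ j (by simp; omega)]
      have hj' : j < (pre ++ [c]).length := by simp; omega
      have hgd : (pre ++ [c]).getD j [] = pre.getD j [] := List.getD_append _ _ _ _ hj
      have hst : (pre ++ [c]).set j (pre.getD j [] ++ mflat p rest)
          = pre.set j (pre.getD j [] ++ mflat p rest) ++ [c] := List.set_append_left _ _ hj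
      rw [hgd, hst]
      simp [mflat, mkeep, hnc]

theorem addALoop_none (p : List Int) :
    ∀ (suffix pre : List (List (List Int))),
    finishA p (addALoop p (pre ++ suffix) pre.length none) = pre ++ Fspec p suffix := by
  intro suffix
  induction suffix with
  | nil =>
    intro pre
    rw [addALoop]
    simp [finishA, Fspec]
  | cons c rest ih =>
    intro pre
    rw [addALoop]
    have hlt : pre.length < (pre ++ c :: rest).length := by simp
    rw [dif_pos hlt]
    have hget : (pre ++ c :: rest)[pre.length]'hlt = c := by simp
    rw [hget]; simp only [closeA_eq_nearB]
    by_cases hnc : nearB p c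
    · rw [if_pos hnc]
      have hset : (pre ++ c :: rest).set pre.length (c ++ [p])
          = (pre ++ [c ++ [p]]) ++ rest := by
        rw [List.set_append_right _ _ (le_refl _)]
        simp
      rw [hset]
      have h2 : pre.length + 1 = (pre ++ [c ++ [p]]).length := by simp
      have hj : pre.length < (pre ++ [c ++ [p]]).length := by simp
      rw [h2, addALoop_some p rest _ _ hj]
      have hgd : (pre ++ [c ++ [p]]).getD pre.length [] = c ++ [p] := by
        simp [List.getD_eq_getElem _ _ hj]
      have hst : (pre ++ [c ++ [p]]).set pre.length ((c ++ [p]) ++ mflat p rest)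
          = pre ++ [(c ++ [p]) ++ mflat p rest] := by
        rw [List.set_append_right _ _ (le_refl _)]
        simp
      rw [hgd, hst]
      simp [finishA, Fspec, hnc, List.append_assoc]
    · rw [if_neg hnc]
      have h1 : pre ++ c :: rest = (pre ++ [c]) ++ rest := by simp
      have h2 : pre.length + 1 = (pre ++ [c]).length := by simp
      rw [h1, h2, ih]
      simp [Fspec, hnc]

theorem A_eq_F (cs : List (List (List Int))) (p : List Int) :
    add_point cs p = Fspec p cs := by
  have h := addALoop_none p cs []
  simpa [finishA, add_point] using h

-- B side -------------------------------------------------------------------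

-- B's main body with an arbitrary enumerate start (add_point_alt is bmain at start 0)
def bmain (p : List Int) (s : Int) (cs : List (List (List Int))) : List (List (List Int)) :=
  let matched := (PySem.List.enumerate cs s).filter (fun ic => nearB p ic.2)
  match matched with
  | [] => cs ++ [[p]]
  | (first, c0) :: rest =>
    let merged := rest.foldl (fun acc ic => acc ++ ic.2) (c0 ++ [p])
    ((PySem.List.enumerate cs s).filter (fun ic => ic.1 == first || !nearB p ic.2)).map
      (fun ic => if ic.1 == first then merged else ic.2)

theorem alt_eq_bmain (cs : List (List (List Int))) (p : List Int) :
    add_point_alt cs p = bmain p 0 cs := rfl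

theorem foldl_append_snd {α β : Type} (l : List (α × List β)) (z : List β) :
    l.foldl (fun acc ic => acc ++ ic.2) z = z ++ (l.map (·.2)).flatten := by
  induction l generalizing z with
  | nil => simp
  | cons x xs ih => simp [ih, List.append_assoc]

theorem map_snd_filter_enumerate (p : List Int) :
    ∀ (l : List (List (List Int))) (s : Int),
    (((PySem.List.enumerate l s).filter (fun ic => nearB p ic.2)).map (·.2))
      = l.filter (fun c => nearB p c) := by
  intro l
  induction l with
  | nil => intro s; simp [PySem.List.enumerate_nil]
  | cons c rest ih =>
    intro s
    rw [PySem.List.enumerate_cons]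
    by_cases h : nearB p c <;> simp [h, ih (s+1)]

-- indices in enumerate l s are ≥ s
theorem fst_ge_of_mem_enumerate {α : Type} (l : List α) (s : Int) (ic : Int × α)
    (h : ic ∈ PySem.List.enumerate l s) : s ≤ ic.1 := by
  rw [PySem.List.mem_enumerate_iff] at h
  obtain ⟨k, hk, rfl⟩ := h
  simp

-- when t < s, the comprehension over enumerate l s with target t is just mkeep
theorem map_filter_enumerate_of_lt (p : List Int) (merged : List (List Int)) :
    ∀ (l : List (List (List Int))) (s t : Int), t < s →
    (((PySem.List.enumerate l s).filter (fun ic => ic.1 == t || !nearB p ic.2)).map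
      (fun ic => if ic.1 == t then merged else ic.2)) = mkeep p l := by
  intro l
  induction l with
  | nil => intro s t ht; simp [PySem.List.enumerate_nil, mkeep]
  | cons c rest ih =>
    intro s t ht
    rw [PySem.List.enumerate_cons, List.filter_cons]
    have h0 : (s == t) = false := by simp; omega
    have ih' := ih (s+1) t (by omega)
    by_cases h : nearB p c
    · rw [if_neg (by simp [h0, h]), ih']
      simp [mkeep, h]
    · rw [if_pos (by simp [h0, h]), List.map_cons, if_neg (by simp [h0]), ih']
      simp [mkeep, h]

theorem bmain_eq_F (p : List Int) :
    ∀ (cs : List (List (List Int))) (s : Int), bmain p s cs = Fspec p cs := by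
  intro cs
  induction cs with
  | nil => intro s; simp [bmain, PySem.List.enumerate_nil, Fspec]
  | cons c rest ih =>
    intro s
    rw [bmain]
    rw [PySem.List.enumerate_cons]
    by_cases hc : nearB p c
    · -- head matches: first = s, merged = c ++ [p] ++ mflat rest
      rw [List.filter_cons, if_pos (by simpa using hc)]
      simp only
      rw [foldl_append_snd, map_snd_filter_enumerate]
      rw [List.filter_cons, if_pos (by simp), List.map_cons, if_pos (by simp)]
      rw [map_filter_enumerate_of_lt p _ rest (s+1) s (by omega)]
      rw [Fspec, if_pos hc]
      simp [mflat, List.append_assoc]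
    · -- head does not match
      simp only [List.filter_cons, hc]
      rw [if_neg (by simp)]
      have ihs := ih (s+1)
      rw [bmain] at ihs
      rcases hm : (PySem.List.enumerate rest (s+1)).filter (fun ic => nearB p ic.2) with _ | ⟨⟨first, c0⟩, rest'⟩
      · -- no matches at all
        rw [hm] at ihs
        simp only at ihs
        rw [hm]
        simp only [Fspec, hc, Bool.false_eq_true, if_false]
        simp only [List.cons_append]
        exact congrArg (c :: ·) ihs
      · rw [hm] at ihs ⊢
        simp only at ihs ⊢
        -- first ≥ s+1, so head (s,c) is kept and maps to c
        have hmem : (first, c0) ∈ PySem.List.enumerate rest (s+1) := by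
          have : (first, c0) ∈ (PySem.List.enumerate rest (s+1)).filter (fun ic => nearB p ic.2) := by
            rw [hm]; exact List.mem_cons_self
          exact List.mem_of_mem_filter this
        have hge : s + 1 ≤ first := fst_ge_of_mem_enumerate _ _ _ hmem
        have hne : (s == first) = false := by simp; omega
        rw [if_pos (by simp)]
        rw [List.map_cons, if_neg (by simp [hne])]
        rw [Fspec, if_neg (by simp [hc]), ← ihs]

theorem B_eq_F (cs : List (List (List Int))) (p : List Int) :
    add_point_alt cs p = Fspec p cs := by
  rw [alt_eq_bmain, bmain_eq_F]

-- ===== VERDICT (by name: the statement is the Claim_ definition above) =====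
theorem add_point_spec : Claim_equal_add_point := by
  intro cs p _
  unfold Spec_add_point
  rw [A_eq_F, B_eq_F]
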